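-- pv_equiv track=rewrite | github.com/GrasshopperBears/study_algorithm | algorithm_python/leet/codejam_21_moons_and_umbrellas.py | calc
-- ===== SOURCE A (Python) =====
-- def movePtr(front, back, s):
--     frontMoved, backMoved = True if front == 0 and s[back] == '?' else False, False
--     while True:
--         if back == len(s) - 1:
--             break
--         if not backMoved:
--             back += 1
--             backMoved = True
--             continue
--         elif s[back] == '?':
--             back += 1
--             continue
--         break
--
--     while True:
--         if front == back - 1:
--             break
--         if not frontMoved or s[front] == '?':
--             front += 1
--             frontMoved = True
--             continue
--         elif front < len(s)-1 and s[front + 1] == '?':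
--             break
--         elif s[front] == '?':
--             front += 1
--             continue
--         break
--
--     return front, back
--
-- def calc(x, y, s):
--     if len(s) <= 1:
--         return 0
--     front, back = 0, 1
--     cost = 0
--     while True:
--         if s[front] == 'C' and s[back] == 'J':
--             cost += x
--         elif s[front] == 'J' and s[back] == 'C':
--             cost += y
--         if back == len(s) - 1:
--             break
--         front, back = movePtr(front, back, s)
--
--     return cost
-- ===== SOURCE B (Python) =====
-- def calc(x, y, s):
--     cost = 0
--     prev = None
--     for c in s:
--         if c != '?':
--             if prev == 'C' and c == 'J':
--                 cost += x
--             elif prev == 'J' and c == 'C':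
--                 cost += y
--             prev = c
--     return cost
-- ===== Notes on version B (the rewrite author's own statement) =====
-- stated objective: simpler
-- what changed: Replaced the two mutually-advancing pointers with the movePtr helper (two inner while loops per step) by a single forward scan that tracks the last non-'?' character seen and adds x on a C->J transition and y on a J->C transition.
import Mathlib
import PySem

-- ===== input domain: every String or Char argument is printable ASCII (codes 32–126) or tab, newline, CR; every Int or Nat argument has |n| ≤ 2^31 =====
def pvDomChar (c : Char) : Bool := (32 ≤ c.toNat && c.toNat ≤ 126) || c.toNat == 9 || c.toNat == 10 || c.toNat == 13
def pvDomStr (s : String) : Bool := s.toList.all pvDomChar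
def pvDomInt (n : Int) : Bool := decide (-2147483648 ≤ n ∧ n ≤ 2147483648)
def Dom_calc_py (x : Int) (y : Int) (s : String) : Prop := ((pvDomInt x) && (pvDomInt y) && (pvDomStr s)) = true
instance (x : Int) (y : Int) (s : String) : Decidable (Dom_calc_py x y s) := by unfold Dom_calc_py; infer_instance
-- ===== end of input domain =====

-- B replaces A's two mutually-advancing pointers (and the movePtr helper) by one forward
-- scan tracking the last non-'?' character; same return value, simpler code.

-- ===== PORT A =====
-- s[i]: indices are in range in every state A's loops actually reach (calc keeps
-- front < back ≤ len-1), so plain getD is exact there; default char is irrelevant.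
def pvAt (cs : List Char) (i : Nat) : Char := cs.getD i ' '

-- first while-loop of movePtr: advances `back`; fuel bounds the iteration count
-- (the loop runs at most cs.length steps; callers pass fuel = cs.length + 1).
def movePtrBack (cs : List Char) : Nat → Nat → Bool → Nat
  | 0, back, _ => back
  | fuel + 1, back, backMoved =>
    if back = cs.length - 1 then back
    else if backMoved = false then movePtrBack cs fuel (back + 1) true
    else if pvAt cs back = '?' then movePtrBack cs fuel (back + 1) true
    else back

-- second while-loop of movePtr: advances `front` (branches in A's order)
def movePtrFront (cs : List Char) (back : Nat) : Nat → Nat → Bool → Nat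
  | 0, front, _ => front
  | fuel + 1, front, frontMoved =>
    if front = back - 1 then front
    else if frontMoved = false ∨ pvAt cs front = '?' then movePtrFront cs back fuel (front + 1) true
    else if front < cs.length - 1 ∧ pvAt cs (front + 1) = '?' then front
    else if pvAt cs front = '?' then movePtrFront cs back fuel (front + 1) frontMoved
    else front

def movePtr (front back : Nat) (cs : List Char) : Nat × Nat :=
  let frontMoved : Bool := decide (front = 0 ∧ pvAt cs back = '?')
  let back' := movePtrBack cs (cs.length + 1) back false
  let front' := movePtrFront cs back' (cs.length + 1) front frontMoved
  (front', back')

-- the main while-loop of calc; `back` strictly increases each round, so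
-- fuel = cs.length + 1 suffices
def calcLoop (x y : Int) (cs : List Char) : Nat → Nat → Nat → Int → Int
  | 0, _, _, cost => cost
  | fuel + 1, front, back, cost =>
    let cost := if pvAt cs front = 'C' ∧ pvAt cs back = 'J' then cost + x
                else if pvAt cs front = 'J' ∧ pvAt cs back = 'C' then cost + y
                else cost
    if back = cs.length - 1 then cost
    else
      let p := movePtr front back cs
      calcLoop x y cs fuel p.1 p.2 cost

def calc_py (x : Int) (y : Int) (s : String) : Int :=
  let cs := s.toList
  if cs.length ≤ 1 then 0
  else calcLoop x y cs (cs.length + 1) 0 1 0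

-- ===== PORT B =====
def calc_py_alt (x : Int) (y : Int) (s : String) : Int :=
  (s.toList.foldl
    (fun (st : Option Char × Int) c =>
      if c ≠ '?' then
        (some c,
         if st.1 = some 'C' ∧ c = 'J' then st.2 + x
         else if st.1 = some 'J' ∧ c = 'C' then st.2 + y
         else st.2)
      else st)
    (none, 0)).2

-- ===== PRECONDITION & SPEC =====
def Spec_calc_py (x : Int) (y : Int) (s : String) (out : Int) : Prop := out = calc_py_alt x y s
instance (x : Int) (y : Int) (s : String) (out : Int) : Decidable (Spec_calc_py x y s out) := by unfold Spec_calc_py; infer_instance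

-- ===== CLAIM (what is proved, stated in full; the proofs are below) =====
def Claim_equal_calc_py : Prop := ∀ (x : Int) (y : Int) (s : String), Dom_calc_py x y s → Spec_calc_py x y s (calc_py x y s)

-- ===== LEMMAS AND PROOFS =====

-- transition cost of one pair
def transC (x y : Int) (p : Option Char) (c : Char) : Int :=
  if p = some 'C' ∧ c = 'J' then x else if p = some 'J' ∧ c = 'C' then y else 0

-- recursive reading of B
def gCost (x y : Int) : Option Char → List Char → Int
  | _, [] => 0
  | p, c :: t => if c ≠ '?' then transC x y p c + gCost x y (some c) t else gCost x y p t

lemma foldl_gCost (x y : Int) (cs : List Char) : ∀ (p : Option Char) (cost : Int),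
    (cs.foldl
      (fun (st : Option Char × Int) c =>
        if c ≠ '?' then
          (some c,
           if st.1 = some 'C' ∧ c = 'J' then st.2 + x
           else if st.1 = some 'J' ∧ c = 'C' then st.2 + y
           else st.2)
        else st)
      (p, cost)).2 = cost + gCost x y p cs := by
  induction cs with
  | nil => intro p cost; simp [gCost]
  | cons c t ih =>
    intro p cost
    by_cases hc : c = '?'
    · simp only [List.foldl_cons, hc, ne_eq, not_true_eq_false, if_false]
      rw [ih]
      simp [gCost]
    · simp only [List.foldl_cons, ne_eq, hc, not_false_eq_true, if_true]
      rw [ih]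
      simp only [gCost, ne_eq, hc, not_false_eq_true, if_true, transC]
      split_ifs <;> ring

-- scan helper (spec of both inner loops): first j' ≥ j with j' = bound or cs[j'] ≠ '?'
def stopAt (cs : List Char) (bound : Nat) (j : Nat) : Nat :=
  if h : j < bound ∧ pvAt cs j = '?' then stopAt cs bound (j + 1) else j
termination_by bound - j
decreasing_by omega

lemma stopAt_ge (cs : List Char) (bound j : Nat) : j ≤ stopAt cs bound j := by
  fun_induction stopAt cs bound j with
  | case1 j h ih => omega
  | case2 j h => exact le_refl _

lemma stopAt_le (cs : List Char) (bound j : Nat) (h : j ≤ bound) : stopAt cs bound j ≤ bound := by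
  fun_induction stopAt cs bound j with
  | case1 j h' ih => exact ih (by omega)
  | case2 j h' => omega

lemma stopAt_mid (cs : List Char) (bound j k : Nat) (h1 : j ≤ k) (h2 : k < stopAt cs bound j) :
    pvAt cs k = '?' := by
  fun_induction stopAt cs bound j with
  | case1 j h' ih =>
    rcases Nat.eq_or_lt_of_le h1 with rfl | hlt
    · exact h'.2
    · exact ih (by omega) h2
  | case2 j h' => omega

lemma stopAt_stop (cs : List Char) (bound j : Nat) (hj : j ≤ bound) :
    stopAt cs bound j = bound ∨ pvAt cs (stopAt cs bound j) ≠ '?' := by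
  fun_induction stopAt cs bound j with
  | case1 j h' ih => exact ih (by omega)
  | case2 j h' =>
    by_cases hq : pvAt cs j = '?'
    · have hnb : ¬ j < bound := fun hlt => h' ⟨hlt, hq⟩
      left; omega
    · right; exact hq

-- stopAt is determined by: the scanned prefix is all '?' and the stop index is a stop
lemma stopAt_eq_of (cs : List Char) (bound j m : Nat) (h1 : j ≤ m) (h2 : m ≤ bound)
    (hmid : ∀ k, j ≤ k → k < m → pvAt cs k = '?')
    (hstop : m = bound ∨ pvAt cs m ≠ '?') : stopAt cs bound j = m := by
  fun_induction stopAt cs bound j with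
  | case1 j h' ih =>
    rcases Nat.eq_or_lt_of_le h1 with rfl | hlt
    · rcases hstop with rfl | hne
      · omega
      · exact absurd h'.2 hne
    · exact ih (by omega) (fun k hk1 hk2 => hmid k (by omega) hk2)
  | case2 j h' =>
    rcases Nat.eq_or_lt_of_le h1 with rfl | hlt
    · rfl
    · exact absurd ⟨by omega, hmid j (le_refl _) hlt⟩ h'

-- the back loop computes stopAt with bound = len-1, starting at back+1
lemma movePtrBack_eq (cs : List Char) : ∀ (fuel j : Nat), j ≤ cs.length - 1 →
    cs.length - 1 ≤ fuel + j → movePtrBack cs fuel j true = stopAt cs (cs.length - 1) j := by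
  intro fuel
  induction fuel with
  | zero =>
    intro j h1 h2
    have : j = cs.length - 1 := by omega
    subst this
    rw [stopAt, dif_neg (by omega)]
    rfl
  | succ fuel ih =>
    intro j h1 h2
    by_cases hj : j = cs.length - 1
    · subst hj
      rw [movePtrBack, if_pos rfl, stopAt, dif_neg (by omega)]
    · by_cases hq : pvAt cs j = '?'
      · rw [movePtrBack, if_neg hj]
        simp only [Bool.true_eq_false, if_false, if_pos hq]
        conv_rhs => rw [stopAt]
        rw [dif_pos ⟨by omega, hq⟩]
        exact ih (j + 1) (by omega) (by omega)
      · rw [movePtrBack, if_neg hj]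
        simp only [Bool.true_eq_false, if_false, if_neg hq]
        rw [stopAt, dif_neg (by simp [hq])]

lemma movePtrBack_eq' (cs : List Char) (fuel back : Nat) (h : back < cs.length - 1)
    (hf : cs.length - 1 ≤ fuel + back) :
    movePtrBack cs (fuel + 1) back false = stopAt cs (cs.length - 1) (back + 1) := by
  rw [movePtrBack, if_neg (by omega), if_pos rfl]
  exact movePtrBack_eq cs fuel (back + 1) (by omega) (by omega)

-- the front loop, after its first forced move, computes stopAt with bound = back'-1
lemma movePtrFront_eq (cs : List Char) (back' : Nat) : ∀ (fuel j : Nat), j ≤ back' - 1 →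
    back' - 1 ≤ fuel + j → movePtrFront cs back' fuel j true = stopAt cs (back' - 1) j := by
  intro fuel
  induction fuel with
  | zero =>
    intro j h1 h2
    have : j = back' - 1 := by omega
    subst this
    rw [stopAt, dif_neg (by omega)]
    rfl
  | succ fuel ih =>
    intro j h1 h2
    by_cases hj : j = back' - 1
    · subst hj
      rw [movePtrFront, if_pos rfl, stopAt, dif_neg (by omega)]
    · by_cases hq : pvAt cs j = '?'
      · rw [movePtrFront, if_neg hj, if_pos (Or.inr hq)]
        conv_rhs => rw [stopAt]
        rw [dif_pos ⟨by omega, hq⟩]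
        exact ih (j + 1) (by omega) (by omega)
      · rw [movePtrFront, if_neg hj,
            if_neg (by simp [hq]), stopAt, dif_neg (by simp [hq])]
        simp only [if_neg hq]
        exact ite_self j

-- gCost skips a '?' head
lemma pvAt_eq_getElem (cs : List Char) (i : Nat) (h : i < cs.length) : pvAt cs i = cs[i] :=
  List.getD_eq_getElem cs ' ' h

lemma gCost_skip (x y : Int) (cs : List Char) (p : Option Char) : ∀ (a b : Nat), a ≤ b →
    b ≤ cs.length → (∀ k, a ≤ k → k < b → pvAt cs k = '?') →
    gCost x y p (cs.drop a) = gCost x y p (cs.drop b) := by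
  intro a b hab
  induction hab with
  | refl => intro _ _; rfl
  | @step m hle ih =>
    intro hm hmid
    rw [ih (by omega) (fun k hk1 hk2 => hmid k hk1 (by omega))]
    have hmlen : m < cs.length := by omega
    rw [List.drop_eq_getElem_cons hmlen, gCost]
    have : cs[m] = '?' := by rw [← pvAt_eq_getElem cs m hmlen]; exact hmid m (by omega) (by omega)
    simp [this]

-- encoding of A's front pointer as B's prev
def enc (cs : List Char) (front : Nat) : Option Char :=
  if pvAt cs front = '?' then none else some (pvAt cs front)

lemma transC_qm (x y : Int) (p : Option Char) : transC x y p '?' = 0 := by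
  simp [transC]

-- the cost update in A's main loop is one gCost transition
lemma stepCost_eq (x y cost : Int) (cs : List Char) (front : Nat) (b : Char) :
    (if pvAt cs front = 'C' ∧ b = 'J' then cost + x
     else if pvAt cs front = 'J' ∧ b = 'C' then cost + y
     else cost) = cost + transC x y (enc cs front) b := by
  unfold enc transC
  by_cases ha : pvAt cs front = '?'
  · simp [ha]
  · simp only [if_neg ha, Option.some.injEq]
    split_ifs <;> simp_all

-- main invariant lemma
lemma calcLoop_eq (x y : Int) (cs : List Char) : ∀ (N fuel front back : Nat) (cost : Int),
    cs.length - back ≤ N →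
    cs.length ≤ fuel + back →
    front < back → back < cs.length →
    (∀ k, front < k → k < back → pvAt cs k = '?') →
    (pvAt cs back = '?' → back < cs.length - 1 → front = 0) →
    calcLoop x y cs fuel front back cost = cost + gCost x y (enc cs front) (cs.drop back) := by
  intro N
  induction N with
  | zero => intro fuel front back cost hN _ _ hblen _ _; omega
  | succ N ih =>
    intro fuel front back cost hN hfuel hfb hblen hmid hJ
    obtain ⟨fuel, rfl⟩ : ∃ f, fuel = f + 1 := ⟨fuel - 1, by omega⟩
    by_cases hb : back = cs.length - 1
    · -- last iteration: the loop breaks after adding the final transition cost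
      simp only [calcLoop, if_pos hb]
      rw [stepCost_eq]
      have hdrop : cs.drop back = [cs[back]] := by
        rw [List.drop_eq_getElem_cons hblen, List.drop_eq_nil_of_le (by omega)]
      rw [hdrop]
      by_cases hc : pvAt cs back = '?'
      · have hcg : cs[back] = '?' := by rw [← pvAt_eq_getElem cs back hblen]; exact hc
        rw [hc, hcg]
        simp [gCost, transC_qm]
      · have hcg : cs[back] ≠ '?' := by rw [← pvAt_eq_getElem cs back hblen]; exact hc
        rw [pvAt_eq_getElem cs back hblen]
        simp [gCost, hcg]
    · -- the loop continues: back < len - 1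
      have hblt : back < cs.length - 1 := by omega
      simp only [calcLoop, if_neg hb, movePtr]
      rw [movePtrBack_eq' cs cs.length back hblt (by omega)]
      set b' := stopAt cs (cs.length - 1) (back + 1) with hb'def
      have hge : back + 1 ≤ b' := stopAt_ge cs (cs.length - 1) (back + 1)
      have hle : b' ≤ cs.length - 1 := stopAt_le cs (cs.length - 1) (back + 1) (by omega)
      have hmid' : ∀ k, back + 1 ≤ k → k < b' → pvAt cs k = '?' :=
        fun k h1 h2 => stopAt_mid cs (cs.length - 1) (back + 1) k h1 h2
      have hstop : b' = cs.length - 1 ∨ pvAt cs b' ≠ '?' :=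
        stopAt_stop cs (cs.length - 1) (back + 1) (by omega)
      have hb'ne : b' < cs.length - 1 → pvAt cs b' ≠ '?' := by
        intro hlt hq'
        rcases hstop with h | h
        · omega
        · exact h hq'
      rw [stepCost_eq]
      by_cases hq : pvAt cs back = '?'
      · -- compared char is '?': no cost added, prev unchanged
        have hf0 : front = 0 := hJ hq hblt
        subst hf0
        have hdec : decide (0 = 0 ∧ pvAt cs back = '?') = true := by simp [hq]
        rw [hdec]
        have hskip : gCost x y (enc cs 0) (cs.drop back) = gCost x y (enc cs 0) (cs.drop b') := by
          refine gCost_skip x y cs (enc cs 0) back b' (by omega) (by omega) ?_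
          intro k h1 h2
          rcases Nat.eq_or_lt_of_le h1 with rfl | hlt
          · exact hq
          · exact hmid' k (by omega) h2
        by_cases hcf : pvAt cs 0 = '?'
        · -- prev is none; front slides to b' - 1, still reading '?'
          have hfront : movePtrFront cs b' (cs.length + 1) 0 true = stopAt cs (b' - 1) 1 := by
            rw [movePtrFront, if_neg (by omega : ¬ (0 : Nat) = b' - 1), if_pos (Or.inr hcf)]
            exact movePtrFront_eq cs b' cs.length 1 (by omega) (by omega)
          rw [hfront]
          set f' := stopAt cs (b' - 1) 1 with hf'def
          have hf'ge : 1 ≤ f' := stopAt_ge cs (b' - 1) 1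
          have hf'le : f' ≤ b' - 1 := stopAt_le cs (b' - 1) 1 (by omega)
          have hallq : ∀ k, k < b' → pvAt cs k = '?' := by
            intro k hk
            rcases Nat.lt_or_ge k back with hk1 | hk1
            · rcases Nat.eq_zero_or_pos k with rfl | hk2
              · exact hcf
              · exact hmid k (by omega) hk1
            · rcases Nat.eq_or_lt_of_le hk1 with rfl | hk2
              · exact hq
              · exact hmid' k (by omega) hk
          have hf'q : pvAt cs f' = '?' := hallq f' (by omega)
          rw [ih fuel f' b' _ (by omega) (by omega) (by omega) (by omega)
              (fun k _ hk2 => hallq k hk2)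
              (fun hq' hlt' => absurd hq' (hb'ne hlt'))]
          rw [hq, transC_qm, hskip]
          have henc : enc cs f' = enc cs 0 := by unfold enc; rw [hf'q, hcf]
          rw [henc]
          ring
        · -- prev = cs[0] ≠ '?': front stays at 0
          have hfront : movePtrFront cs b' (cs.length + 1) 0 true = 0 := by
            rw [movePtrFront, if_neg (by omega : ¬ (0 : Nat) = b' - 1),
                if_neg (by simp [hcf]), if_neg hcf]
            exact ite_self 0
          rw [hfront]
          rw [ih fuel 0 b' _ (by omega) (by omega) (by omega) (by omega)
              (fun k h1 h2 => by
                rcases Nat.lt_or_ge k back with hk1 | hk1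
                · exact hmid k h1 hk1
                · rcases Nat.eq_or_lt_of_le hk1 with rfl | hk2
                  · exact hq
                  · exact hmid' k (by omega) h2)
              (fun _ _ => rfl)]
          rw [hq, transC_qm, hskip]
          ring
      · -- compared char is real: cost transition added, prev becomes cs[back]
        have hdec : decide (front = 0 ∧ pvAt cs back = '?') = false := by simp [hq]
        rw [hdec]
        have hfront : movePtrFront cs b' (cs.length + 1) front false = back := by
          rw [movePtrFront, if_neg (by omega : ¬ front = b' - 1), if_pos (Or.inl rfl)]
          rw [movePtrFront_eq cs b' cs.length (front + 1) (by omega) (by omega)]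
          exact stopAt_eq_of cs (b' - 1) (front + 1) back (by omega) (by omega)
            (fun k h1 h2 => hmid k (by omega) h2) (Or.inr hq)
        rw [hfront]
        rw [ih fuel back b' _ (by omega) (by omega) (by omega) (by omega)
            (fun k h1 h2 => hmid' k (by omega) h2)
            (fun hq' hlt' => absurd hq' (hb'ne hlt'))]
        have h1 : cs[back] ≠ '?' := by rw [← pvAt_eq_getElem cs back hblen]; exact hq
        rw [List.drop_eq_getElem_cons hblen]
        simp only [gCost, ne_eq, h1, not_false_eq_true, if_true]
        rw [gCost_skip x y cs (some cs[back]) (back + 1) b' (by omega) (by omega)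
            (fun k hk1 hk2 => hmid' k hk1 hk2)]
        have h2 : enc cs back = some cs[back] := by
          unfold enc; rw [if_neg hq, pvAt_eq_getElem cs back hblen]
        rw [h2, pvAt_eq_getElem cs back hblen]
        ring

-- ===== VERDICT (by name: the statement is the Claim_ definition above) =====
lemma transC_none (x y : Int) (c : Char) : transC x y none c = 0 := by
  simp [transC]

theorem calc_py_spec : Claim_equal_calc_py := by
  intro x y s _
  unfold Spec_calc_py calc_py calc_py_alt
  rw [foldl_gCost]
  by_cases hl : s.toList.length ≤ 1
  · rw [if_pos hl]
    rcases hcs : s.toList with _ | ⟨c, _ | ⟨d, t⟩⟩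
    · simp [gCost]
    · simp [gCost, transC]
    · rw [hcs] at hl; simp at hl
  · rw [if_neg hl]
    have hlen : 2 ≤ s.toList.length := by omega
    rw [calcLoop_eq x y s.toList s.toList.length (s.toList.length + 1) 0 1 0 (by omega)
        (by omega) (by omega) (by omega) (fun k h1 h2 => by omega) (fun _ _ => rfl)]
    have h0 : 0 < s.toList.length := by omega
    have hsplit : gCost x y none s.toList = gCost x y (enc s.toList 0) (s.toList.drop 1) := by
      conv_lhs => rw [← List.drop_zero (l := s.toList), List.drop_eq_getElem_cons h0]
      by_cases h0q : s.toList[0] = '?'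
      · simp only [gCost, h0q, ne_eq, not_true_eq_false, if_false]
        have : enc s.toList 0 = none := by
          unfold enc; rw [pvAt_eq_getElem s.toList 0 h0, if_pos h0q]
        rw [this]
      · simp only [gCost, ne_eq, h0q, not_false_eq_true, if_true, transC_none]
        have : enc s.toList 0 = some s.toList[0] := by
          unfold enc; rw [pvAt_eq_getElem s.toList 0 h0, if_neg h0q]
        rw [this]
        ring
    rw [hsplit]
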